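-- pv_equiv track=rewrite | github.com/leandrohbar/CS50-python | plate/plate.py | numbers_end
-- ===== SOURCE A (Python) =====
-- def numbers_end(plat_e):
--     if any(char.isdigit() for char in plat_e):
--         found_digit = False
--         numbers = ""
--         for item in plat_e:
--             if item.isdigit():
--                 numbers += item
--                 found_digit = True
--             elif found_digit:
--                 return False
--
--         return not numbers[0] == "0"
--     else:
--         return True
-- ===== SOURCE B (Python) =====
-- def numbers_end(plat_e):
--     # Reverse scan: peel the trailing digit block, then check prefix and leading zero.
--     i = len(plat_e)
--     while i > 0 and plat_e[i - 1].isdigit():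
--         i -= 1
--     prefix = plat_e[:i]
--     trailing = plat_e[i:]
--     if any(c.isdigit() for c in prefix):
--         return False
--     if not trailing:
--         return True
--     return trailing[0] != "0"
-- ===== Notes on version B (the rewrite author's own statement) =====
-- stated objective: alternative
-- what changed: Replaces A's forward found_digit state machine (with early return and digit accumulation) by a reverse scan that splits off the trailing digit block and then checks the prefix for digits and the block's first character for a leading zero.
import Mathlib
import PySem

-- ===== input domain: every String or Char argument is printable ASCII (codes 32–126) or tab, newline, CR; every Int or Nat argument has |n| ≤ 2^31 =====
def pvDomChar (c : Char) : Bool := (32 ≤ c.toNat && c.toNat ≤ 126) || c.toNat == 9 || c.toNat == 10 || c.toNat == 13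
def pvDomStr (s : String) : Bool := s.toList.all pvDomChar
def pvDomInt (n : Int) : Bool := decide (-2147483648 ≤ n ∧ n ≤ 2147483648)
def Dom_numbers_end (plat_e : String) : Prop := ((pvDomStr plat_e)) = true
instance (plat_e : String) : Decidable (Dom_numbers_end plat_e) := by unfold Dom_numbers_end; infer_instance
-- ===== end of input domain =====

-- B replaces A's forward found_digit state machine by a reverse scan splitting off the
-- trailing digit block; objective: alternative decomposition (same asymptotic cost).

-- ===== PORT A =====
-- the for-loop of A: carries found_digit and the accumulated digit string; none = early `return False`
def numbersEndLoop (l : List Char) (fd : Bool) (ns : List Char) : Option (List Char) :=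
  match l with
  | [] => some ns
  | c :: cs =>
    if PySem.Chars.isdigit c then numbersEndLoop cs true (ns ++ [c])
    else if fd then none
    else numbersEndLoop cs fd ns

def numbers_end (plat_e : String) : Bool :=
  if plat_e.toList.any PySem.Chars.isdigit then
    match numbersEndLoop plat_e.toList false [] with
    | none => false
    | some ns =>
      -- `not numbers[0] == "0"`; ns is provably nonempty here (the [] arm is unreachable)
      match ns with
      | [] => false
      | c :: _ => !(c == '0')
  else true

-- ===== PORT B =====
-- the while-loop of B, run over the reversed character list:
-- returns (trailing digit block reversed, rest of the reversed list)
def splitRevB (l : List Char) : List Char × List Char :=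
  match l with
  | [] => ([], [])
  | c :: cs =>
    if PySem.Chars.isdigit c then
      let (t, p) := splitRevB cs
      (c :: t, p)
    else ([], c :: cs)

def numbers_end_alt (plat_e : String) : Bool :=
  if (splitRevB plat_e.toList.reverse).2.reverse.any PySem.Chars.isdigit then false
  else
    match (splitRevB plat_e.toList.reverse).1.reverse with
    | [] => true
    | c :: _ => c != '0'

-- ===== PRECONDITION & SPEC =====
def Spec_numbers_end (plat_e : String) (out : Bool) : Prop := out = numbers_end_alt plat_e
instance (plat_e : String) (out : Bool) : Decidable (Spec_numbers_end plat_e out) := by unfold Spec_numbers_end; infer_instance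

-- ===== CLAIM (what is proved, stated in full; the proofs are below) =====
def Claim_equal_numbers_end : Prop := ∀ (plat_e : String), Dom_numbers_end plat_e → Spec_numbers_end plat_e (numbers_end plat_e)

-- ===== LEMMAS AND PROOFS =====

theorem loop_all_digit (l : List Char) (ns : List Char)
    (h : l.all PySem.Chars.isdigit = true) :
    numbersEndLoop l true ns = some (ns ++ l) := by
  induction l generalizing ns with
  | nil => simp [numbersEndLoop]
  | cons c cs ih =>
    simp only [List.all_cons, Bool.and_eq_true] at h
    simp [numbersEndLoop, h.1, ih _ h.2]

theorem loop_not_all_digit (l : List Char) (ns : List Char)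
    (h : l.all PySem.Chars.isdigit = false) :
    numbersEndLoop l true ns = none := by
  induction l generalizing ns with
  | nil => simp at h
  | cons c cs ih =>
    simp only [List.all_cons, Bool.and_eq_false_iff] at h
    by_cases hc : PySem.Chars.isdigit c = true
    · rcases h with h | h
      · simp [hc] at h
      · simp [numbersEndLoop, hc, ih _ h]
    · simp [numbersEndLoop, hc]

theorem loop_false (l : List Char) (ns : List Char) :
    numbersEndLoop l false ns =
      if (l.dropWhile (fun c => !PySem.Chars.isdigit c)).all PySem.Chars.isdigit then
        some (ns ++ l.filter PySem.Chars.isdigit)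
      else none := by
  induction l generalizing ns with
  | nil => simp [numbersEndLoop]
  | cons c cs ih =>
    by_cases hc : PySem.Chars.isdigit c = true
    · simp only [numbersEndLoop, if_pos, List.dropWhile_cons, hc, Bool.not_true]
      by_cases hall : cs.all PySem.Chars.isdigit = true
      · rw [loop_all_digit cs _ hall]
        have hfil : cs.filter PySem.Chars.isdigit = cs :=
          List.filter_eq_self.mpr (fun a ha => List.all_eq_true.mp hall a ha)
        simp [hc, hall, List.all_cons, hfil]
      · rw [loop_not_all_digit cs _ (by simpa using hall)]
        simp [hc, hall, List.all_cons]
    · simp only [Bool.eq_false_iff] at hc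
      simp [numbersEndLoop, hc, List.filter_cons, ih]

theorem splitRevB_eq (l : List Char) :
    splitRevB l = (l.takeWhile PySem.Chars.isdigit, l.dropWhile PySem.Chars.isdigit) := by
  induction l with
  | nil => simp [splitRevB]
  | cons c cs ih =>
    by_cases hc : PySem.Chars.isdigit c = true
    · simp [splitRevB, hc, ih, List.takeWhile_cons, List.dropWhile_cons]
    · simp only [Bool.eq_false_iff] at hc
      simp [splitRevB, hc, List.takeWhile_cons, List.dropWhile_cons]

theorem head?_dropWhile_false {α : Type} (p : α → Bool) (l : List α) {a : α}
    (h : (l.dropWhile p).head? = some a) : p a = false := by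
  induction l with
  | nil => rw [List.dropWhile_nil] at h; simp at h
  | cons c cs ih =>
    rw [List.dropWhile_cons] at h
    by_cases hc : p c = true
    · exact ih (by simpa [hc] using h)
    · rw [if_neg hc, List.head?_cons, Option.some_inj] at h
      rw [← h]
      exact Bool.eq_false_iff.mpr hc

theorem getLast?_dropWhile {α : Type} (p : α → Bool) (l : List α)
    (h : l.dropWhile p ≠ []) : (l.dropWhile p).getLast? = l.getLast? := by
  induction l with
  | nil => simp [List.dropWhile_nil] at h
  | cons c cs ih =>
    rw [List.dropWhile_cons]
    rw [List.dropWhile_cons] at h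
    by_cases hc : p c = true
    · rw [if_pos hc] at h ⊢
      cases cs with
      | nil => simp [List.dropWhile_nil] at h
      | cons b bs => rw [ih h, List.getLast?_cons_cons]
    · rw [if_neg hc]

-- B's final decision as a function of the split (p = before the trailing digit block, t = the block)
def bDecide (p t : List Char) : Bool :=
  if p.any PySem.Chars.isdigit then false
  else match t with | [] => true | c :: _ => c != '0'

-- the heart: A on p ++ t, where t is all digits and p ends in a non-digit (or is empty),
-- equals B's decision computed from p and t
theorem key (p t : List Char)
    (ht : t.all PySem.Chars.isdigit = true)
    (hp : ∀ c, p.getLast? = some c → PySem.Chars.isdigit c = false) :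
    (if (p ++ t).any PySem.Chars.isdigit then
      match numbersEndLoop (p ++ t) false [] with
      | none => false
      | some ns => match ns with | [] => false | c :: _ => !(c == '0')
    else true)
    = bDecide p t := by
  unfold bDecide
  by_cases hpd : p.any PySem.Chars.isdigit = true
  · -- a digit sits in p, followed (at p's end) by a non-digit: A's loop returns False
    have hpne : p ≠ [] := by rintro rfl; simp at hpd
    have hq : p.dropWhile (fun c => !PySem.Chars.isdigit c) ≠ [] := by
      intro h
      rw [List.dropWhile_eq_nil_iff] at h
      obtain ⟨c, hc, hcd⟩ := List.any_eq_true.mp hpd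
      simpa [hcd] using h c hc
    have hc0 : p.getLast? = some (p.getLast hpne) := List.getLast?_eq_some_getLast hpne
    have hc0d : PySem.Chars.isdigit (p.getLast hpne) = false := hp _ hc0
    -- the dropWhile result is a suffix of p and nonempty, so it has p's last element
    have hlast : (p.dropWhile (fun c => !PySem.Chars.isdigit c)).getLast? = some (p.getLast hpne) := by
      rw [getLast?_dropWhile _ _ hq, hc0]
    have hc0mem : p.getLast hpne ∈ p.dropWhile (fun c => !PySem.Chars.isdigit c) :=
      List.mem_of_getLast? hlast
    have hdrop : (p ++ t).dropWhile (fun c => !PySem.Chars.isdigit c)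
        = p.dropWhile (fun c => !PySem.Chars.isdigit c) ++ t := by
      rw [List.dropWhile_append]
      simp [List.isEmpty_iff, hq]
    have hnall : ((p ++ t).dropWhile (fun c => !PySem.Chars.isdigit c)).all
        PySem.Chars.isdigit = false := by
      rw [hdrop]
      simp only [List.all_append, Bool.and_eq_false_iff]
      left
      rw [Bool.eq_false_iff]
      intro hall
      have := List.all_eq_true.mp hall _ hc0mem
      simp [hc0d] at this
    rw [loop_false]
    simp [hnall, hpd, List.any_append]
  · -- no digit in p: A's loop skips p and accumulates exactly t
    have hpall : ∀ c ∈ p, PySem.Chars.isdigit c = false := by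
      intro c hc
      rw [Bool.eq_false_iff]
      intro hd
      exact hpd (List.any_eq_true.mpr ⟨c, hc, hd⟩)
    have hdropp : p.dropWhile (fun c => !PySem.Chars.isdigit c) = [] := by
      rw [List.dropWhile_eq_nil_iff]
      intro c hc; simp [hpall c hc]
    have hdrop : (p ++ t).dropWhile (fun c => !PySem.Chars.isdigit c)
        = t.dropWhile (fun c => !PySem.Chars.isdigit c) := by
      rw [List.dropWhile_append]
      simp [hdropp]
    have hfilp : p.filter PySem.Chars.isdigit = [] := by
      rw [List.filter_eq_nil_iff]
      intro c hc; simp [hpall c hc]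
    have hfilt : t.filter PySem.Chars.isdigit = t :=
      List.filter_eq_self.mpr (fun c hc => List.all_eq_true.mp ht c hc)
    cases t with
    | nil => simp [hpd]
    | cons c cs =>
      have hcd : PySem.Chars.isdigit c = true := by
        simpa using List.all_eq_true.mp ht c (by simp)
      have hany : (p ++ c :: cs).any PySem.Chars.isdigit = true := by
        rw [List.any_append]; simp [hcd]
      rw [loop_false, hdrop]
      simp [hany, hpd, List.dropWhile_cons, hcd, ht, List.filter_append, hfilp, hfilt, bne]

-- ===== VERDICT (by name: the statement is the Claim_ definition above) =====
theorem numbers_end_spec : Claim_equal_numbers_end := by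
  intro plat_e _
  unfold Spec_numbers_end numbers_end numbers_end_alt
  simp only [splitRevB_eq]
  set t := (plat_e.toList.reverse.takeWhile PySem.Chars.isdigit).reverse with htdef
  set p := (plat_e.toList.reverse.dropWhile PySem.Chars.isdigit).reverse with hpdef
  have hsplit : plat_e.toList = p ++ t := by
    rw [htdef, hpdef, ← List.reverse_append, List.takeWhile_append_dropWhile,
      List.reverse_reverse]
  have ht : t.all PySem.Chars.isdigit = true := by
    rw [htdef, List.all_reverse]
    exact List.all_eq_true.mpr (fun c hc => List.mem_takeWhile_imp hc)
  have hp : ∀ c, p.getLast? = some c → PySem.Chars.isdigit c = false := by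
    intro c hc
    rw [hpdef, List.getLast?_reverse] at hc
    exact head?_dropWhile_false _ _ hc
  rw [hsplit]
  exact (key p t ht hp).trans (by cases t <;> simp [bDecide])
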